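-- pv_equiv track=rewrite | github.com/Joakim5005/A5-2_implementation_code | util.py | check_linearized
-- ===== SOURCE A (Python) =====
-- def triangle(n):
--    return n * (n + 1) // 2
--
-- def formula(a, b, n):
--    if b > a:
--       b, a = a, b
--    return a + (triangle(n - 1) - (n - 1)) - triangle((n-1) - b - 1) - 1
--
-- def generateTranslate(n):
--    trans = {}
--    for a in range(n):
--       for b in range(n):
--          if a == b:
--             continue
--          trans[formula(a, b, n)] = [a,b]
--    return trans
--
-- def check_linearized(r1, linr1, r2, linr2, r3, linr3):
--    t1 = generateTranslate(19)
--    t2 = generateTranslate(22)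
--    t3 = generateTranslate(23)
--    errorList = []
--    #r1
--    for i, val in enumerate(linr1):
--       v1, v2 = t1[i]
--       actualval = r1[v1] * r1[v2]
--       if actualval != val:
--          errorList.append(f'Linearized variable {(v1,v2)} at index {i} in R1 was {val} but should be {actualval}' )
--    #r2
--    for i, val in enumerate(linr2):
--       v1, v2 = t2[i]
--       actualval = r2[v1] * r2[v2]
--       if actualval != val:
--          errorList.append(f'Linearized variable {(v1,v2)} at index {i} in R1 was {val} but should be {actualval}' )
--    #r3
--    for i, val in enumerate(linr3):
--       v1, v2 = t3[i]
--       actualval = r3[v1] * r3[v2]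
--       if actualval != val:
--          errorList.append(f'Linearized variable {(v1,v2)} at index {i} in R1 was {val} but should be {actualval}' )
--    return errorList
-- ===== SOURCE B (Python) =====
-- def _pairs(n):
--     # pairs (a, b) with a > b, in increasing order of the linearized index
--     return [(a, b) for b in range(n - 1) for a in range(b + 1, n)]
--
-- def check_linearized(r1, linr1, r2, linr2, r3, linr3):
--     errors = []
--     for r, linr, n in ((r1, linr1, 19), (r2, linr2, 22), (r3, linr3, 23)):
--         for i, (val, (a, b)) in enumerate(zip(linr, _pairs(n))):
--             expected = r[a] * r[b]
--             if expected != val: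
--                 errors.append(f'Linearized variable {(a, b)} at index {i} in R1 was {val} but should be {expected}')
--     return errors
-- ===== Notes on version B (the rewrite author's own statement) =====
-- stated objective: simpler
-- what changed: B drops A's three precomputed index->pair dictionaries (built by a quadratic double loop over the triangular-number formula) and instead zips each linearized list directly with the pair stream (a,b), a>b, generated in linearized-index order, checking products in one pass.
import Mathlib
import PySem

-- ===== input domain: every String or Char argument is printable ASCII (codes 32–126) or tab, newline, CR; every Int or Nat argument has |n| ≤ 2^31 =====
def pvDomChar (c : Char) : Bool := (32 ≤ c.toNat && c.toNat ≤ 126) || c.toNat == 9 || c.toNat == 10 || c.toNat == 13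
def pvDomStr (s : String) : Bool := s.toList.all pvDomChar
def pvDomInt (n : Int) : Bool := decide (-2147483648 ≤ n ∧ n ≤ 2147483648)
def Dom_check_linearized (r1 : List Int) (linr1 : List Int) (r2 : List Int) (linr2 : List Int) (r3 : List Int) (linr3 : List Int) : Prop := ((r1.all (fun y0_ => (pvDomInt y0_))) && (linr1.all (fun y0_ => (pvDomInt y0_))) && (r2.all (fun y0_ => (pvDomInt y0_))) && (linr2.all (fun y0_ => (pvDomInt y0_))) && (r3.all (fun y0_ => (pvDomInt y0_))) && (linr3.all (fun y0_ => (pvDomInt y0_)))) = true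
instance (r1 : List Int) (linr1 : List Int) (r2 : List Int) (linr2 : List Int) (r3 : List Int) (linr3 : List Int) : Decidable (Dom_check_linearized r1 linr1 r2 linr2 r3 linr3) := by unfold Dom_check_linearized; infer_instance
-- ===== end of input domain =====

-- B replaces A's precomputed index->pair dictionaries by zipping each linearized list
-- with the pair stream generated directly in linearized-index order (simpler, no dict).

-- the f-string both Pythons build, identical character for character
def pvMsg (v1 v2 i val actual : Int) : String :=
  "Linearized variable (" ++ PySem.Int.toStr v1 ++ ", " ++ PySem.Int.toStr v2 ++
    ") at index " ++ PySem.Int.toStr i ++ " in R1 was " ++ PySem.Int.toStr val ++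
    " but should be " ++ PySem.Int.toStr actual

-- ===== PORT A =====
def triangleA (n : Int) : Int := PySem.Int.floordiv (n * (n + 1)) 2

def formulaA (a b n : Int) : Int :=
  -- Python: if b > a: b, a = a, b  — p.1 is b, p.2 is a after the swap
  let p := if b > a then (a, b) else (b, a)
  p.2 + (triangleA (n - 1) - (n - 1)) - triangleA ((n - 1) - p.1 - 1) - 1

def generateTranslate (n : Int) : PySem.Dict Int (List Int) :=
  (PySem.List.pyRange 0 n 1).foldl (fun t a =>
    (PySem.List.pyRange 0 n 1).foldl (fun t b =>
      if a = b then t else t.insert (formulaA a b n) [a, b]) t) PySem.Dict.empty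

-- one 'for i, val in enumerate(linr)' loop of A (found inputs satisfy Pre_, so the
-- dict hit and the r-indexing succeed; .getD defaults are never reached under Pre_)
def loopA (t : PySem.Dict Int (List Int)) (r : List Int) (linr : List Int) (i : Int)
    (acc : List String) : List String :=
  match linr with
  | [] => acc
  | val :: rest =>
    let l := (t.get? i).getD []
    let v1 := l.headD 0
    let v2 := l.tail.headD 0
    let actualval := (PySem.List.pyGet? r v1).getD 0 * (PySem.List.pyGet? r v2).getD 0
    loopA t r rest (i + 1) (if actualval ≠ val then acc ++ [pvMsg v1 v2 i val actualval] else acc)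

def check_linearized (r1 : List Int) (linr1 : List Int) (r2 : List Int) (linr2 : List Int) (r3 : List Int) (linr3 : List Int) : List String :=
  let t1 := generateTranslate 19
  let t2 := generateTranslate 22
  let t3 := generateTranslate 23
  loopA t3 r3 linr3 0 (loopA t2 r2 linr2 0 (loopA t1 r1 linr1 0 []))

-- ===== PORT B =====
-- _pairs(n): pairs (a, b) with a > b, in increasing order of the linearized index
def pairsB (n : Int) : List (Int × Int) :=
  (PySem.List.pyRange 0 (n - 1) 1).flatMap (fun b =>
    (PySem.List.pyRange (b + 1) n 1).map (fun a => (a, b)))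

-- one 'for i, (val, (a, b)) in enumerate(zip(linr, _pairs(n)))' loop of B
def loopB (r : List Int) (zs : List (Int × (Int × Int))) (i : Int)
    (acc : List String) : List String :=
  match zs with
  | [] => acc
  | (val, (a, b)) :: rest =>
    let expected := (PySem.List.pyGet? r a).getD 0 * (PySem.List.pyGet? r b).getD 0
    loopB r rest (i + 1) (if expected ≠ val then acc ++ [pvMsg a b i val expected] else acc)

def check_linearized_alt (r1 : List Int) (linr1 : List Int) (r2 : List Int) (linr2 : List Int) (r3 : List Int) (linr3 : List Int) : List String :=
  loopB r3 (linr3.zip (pairsB 23)) 0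
    (loopB r2 (linr2.zip (pairsB 22)) 0
      (loopB r1 (linr1.zip (pairsB 19)) 0 []))

-- ===== PRECONDITION & SPEC =====
-- Pre_ is exactly where Python A returns normally: each linr list must not outrun the
-- 171/231/253 keys of the index->pair dict (KeyError otherwise), and each r list must be
-- long enough for the largest variable index the first len(linr) pairs touch (IndexError
-- otherwise; that largest index is min(len(linr), n-1) for nonempty linr).
def Pre_check_linearized (r1 : List Int) (linr1 : List Int) (r2 : List Int) (linr2 : List Int) (r3 : List Int) (linr3 : List Int) : Prop :=
  (linr1.length ≤ 171 ∧ (linr1 ≠ [] → min linr1.length 18 < r1.length)) ∧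
  (linr2.length ≤ 231 ∧ (linr2 ≠ [] → min linr2.length 21 < r2.length)) ∧
  (linr3.length ≤ 253 ∧ (linr3 ≠ [] → min linr3.length 22 < r3.length))
instance (r1 : List Int) (linr1 : List Int) (r2 : List Int) (linr2 : List Int) (r3 : List Int) (linr3 : List Int) : Decidable (Pre_check_linearized r1 linr1 r2 linr2 r3 linr3) := by unfold Pre_check_linearized; infer_instance

def pvWitness_check_linearized : List Int × List Int × List Int × List Int × List Int × List Int :=
  ([1, 2], [2], [], [], [], [])

def Spec_check_linearized (r1 : List Int) (linr1 : List Int) (r2 : List Int) (linr2 : List Int) (r3 : List Int) (linr3 : List Int) (out : List String) : Prop := out = check_linearized_alt r1 linr1 r2 linr2 r3 linr3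
instance (r1 : List Int) (linr1 : List Int) (r2 : List Int) (linr2 : List Int) (r3 : List Int) (linr3 : List Int) (out : List String) : Decidable (Spec_check_linearized r1 linr1 r2 linr2 r3 linr3 out) := by unfold Spec_check_linearized; infer_instance

-- ===== CLAIM (what is proved, stated in full; the proofs are below) =====
def Claim_equal_check_linearized : Prop := ∀ (r1 : List Int) (linr1 : List Int) (r2 : List Int) (linr2 : List Int) (r3 : List Int) (linr3 : List Int), Dom_check_linearized r1 linr1 r2 linr2 r3 linr3 → Pre_check_linearized r1 linr1 r2 linr2 r3 linr3 → Spec_check_linearized r1 linr1 r2 linr2 r3 linr3 (check_linearized r1 linr1 r2 linr2 r3 linr3)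

-- ===== LEMMAS AND PROOFS =====

theorem pv_tri2 (m : Int) : 2 * triangleA m = m * (m + 1) := by
  have hdvd : (2:Int) ∣ m * (m + 1) := (Int.even_mul_succ_self m).two_dvd
  have h0 : PySem.Int.mod (m * (m + 1)) 2 = 0 := (PySem.Int.mod_eq_zero_iff_dvd _ _).mpr hdvd
  have h1 := PySem.Int.floordiv_mul_add_mod (m * (m + 1)) 2
  unfold triangleA
  linarith

theorem pv_formulaA_of_lt {a b : Int} (n : Int) (h : b < a) :
    formulaA a b n = a + (triangleA (n - 1) - (n - 1)) - triangleA ((n - 1) - b - 1) - 1 := by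
  simp [formulaA, show ¬ b > a from by omega]

theorem pv_formulaA_swap (a b n : Int) (h : a ≠ b) : formulaA a b n = formulaA b a n := by
  rcases lt_or_gt_of_ne h with hlt | hgt
  · rw [pv_formulaA_of_lt n hlt]
    simp [formulaA, show b > a from hlt]
  · rw [pv_formulaA_of_lt n hgt, formulaA]
    simp [show a > b from hgt]

-- injectivity of the triangular indexing on ordered pairs b < a < n
theorem pv_formulaA_inj {n a b a' b' : Int}
    (_hb : 0 ≤ b) (hba : b < a) (ha : a < n)
    (hb' : 0 ≤ b') (hba' : b' < a') (ha' : a' < n)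
    (heq : formulaA a b n = formulaA a' b' n) : a = a' ∧ b = b' := by
  rw [pv_formulaA_of_lt n hba, pv_formulaA_of_lt n hba'] at heq
  have e1 := pv_tri2 ((n - 1) - b - 1)
  have e2 := pv_tri2 ((n - 1) - b' - 1)
  rcases lt_trichotomy b b' with h | h | h
  · exfalso
    have hd : 2 * triangleA ((n - 1) - b - 1) - 2 * triangleA ((n - 1) - b' - 1)
        = (b' - b) * (2 * n - 3 - b - b') := by linear_combination e1 - e2
    have hf : (0:Int) ≤ 2 * n - 3 - b - b' := by omega
    have hp : 2 * n - 3 - b - b' ≤ (b' - b) * (2 * n - 3 - b - b') :=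
      le_mul_of_one_le_left hf (by omega)
    linarith
  · subst h
    constructor
    · linarith
    · rfl
  · exfalso
    have hd : 2 * triangleA ((n - 1) - b' - 1) - 2 * triangleA ((n - 1) - b - 1)
        = (b - b') * (2 * n - 3 - b - b') := by linear_combination e2 - e1
    have hf : (0:Int) ≤ 2 * n - 3 - b - b' := by omega
    have hp : 2 * n - 3 - b - b' ≤ (b - b') * (2 * n - 3 - b - b') :=
      le_mul_of_one_le_left hf (by omega)
    linarith

-- any in-range b ≠ a₀ that hits the key k = formulaA a₀ b₀ n must be b₀ (inner loop of pass a₀)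
theorem pv_only_b0 {n a₀ b₀ : Int} (hb0 : 0 ≤ b₀) (hlt : b₀ < a₀) (ha : a₀ < n)
    {b : Int} (hb : 0 ≤ b) (hbn : b < n) (hne : a₀ ≠ b)
    (hk : formulaA a₀ b n = formulaA a₀ b₀ n) : b = b₀ := by
  rcases lt_trichotomy b a₀ with hba | hba | hba
  · exact (pv_formulaA_inj hb hba ha hb0 hlt ha hk).2
  · exact absurd hba hne.symm
  · rw [pv_formulaA_swap a₀ b n hne] at hk
    have := pv_formulaA_inj (by omega) hba hbn hb0 hlt ha hk
    omega

-- a run of inner-loop inserts that never writes key k leaves k's binding untouched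
theorem pv_inner_none (n a k : Int) (bs : List Int) (t : PySem.Dict Int (List Int))
    (h : ∀ b ∈ bs, a ≠ b → formulaA a b n ≠ k) :
    ((bs.foldl (fun t b => if a = b then t else t.insert (formulaA a b n) [a, b]) t)).get? k
      = t.get? k := by
  induction bs generalizing t with
  | nil => rfl
  | cons b bs ih =>
    simp only [List.foldl_cons]
    rw [ih _ (fun b' hb' => h b' (List.mem_cons_of_mem _ hb'))]
    by_cases hab : a = b
    · simp [hab]
    · rw [if_neg hab, PySem.Dict.get?_insert_of_ne _ _ (Ne.symm (h b (List.mem_cons_self) hab))]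

theorem pv_inner_hit (n a k b₀ : Int) (bs₂ : List Int) (t : PySem.Dict Int (List Int))
    (hab : a ≠ b₀) (hk : formulaA a b₀ n = k)
    (h2 : ∀ b ∈ bs₂, a ≠ b → formulaA a b n ≠ k) :
    (((b₀ :: bs₂).foldl (fun t b => if a = b then t else t.insert (formulaA a b n) [a, b]) t)).get? k
      = some [a, b₀] := by
  simp only [List.foldl_cons]
  rw [pv_inner_none n a k bs₂ _ h2, if_neg hab, hk, PySem.Dict.get?_insert_self]

-- no a ∈ as owns key k ⇒ those whole outer passes leave k's binding untouched
theorem pv_outer_none (n k : Int) (bs as : List Int) (t : PySem.Dict Int (List Int))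
    (hbs : ∀ b ∈ bs, 0 ≤ b ∧ b < n)
    (h : ∀ a ∈ as, ∀ b, 0 ≤ b → b < n → a ≠ b → formulaA a b n ≠ k) :
    ((as.foldl (fun t a =>
        bs.foldl (fun t b => if a = b then t else t.insert (formulaA a b n) [a, b]) t) t)).get? k
      = t.get? k := by
  induction as generalizing t with
  | nil => rfl
  | cons a as ih =>
    simp only [List.foldl_cons]
    rw [ih _ (fun a' ha' => h a' (List.mem_cons_of_mem _ ha'))]
    apply pv_inner_none
    intro b hb hne
    exact h a (List.mem_cons_self) b (hbs b hb).1 (hbs b hb).2 hne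

-- the heart: in A's dict the key formulaA a₀ b₀ n (b₀ < a₀) is finally bound to [a₀, b₀]
theorem pv_dict_at {n a₀ b₀ : Int} (hb0 : 0 ≤ b₀) (hlt : b₀ < a₀) (ha : a₀ < n) :
    (generateTranslate n).get? (formulaA a₀ b₀ n) = some [a₀, b₀] := by
  have hsplit : PySem.List.pyRange 0 n 1
      = PySem.List.pyRange 0 (a₀ + 1) 1 ++ PySem.List.pyRange (a₀ + 1) n 1 :=
    PySem.List.pyRange_one_append 0 (a₀ + 1) n (by omega) (by omega)
  unfold generateTranslate
  rw [hsplit, List.foldl_append]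
  rw [pv_outer_none n (formulaA a₀ b₀ n) _ (PySem.List.pyRange (a₀ + 1) n 1) _ ?hbs ?hnone]
  case hbs =>
    intro b hb
    rw [← hsplit, PySem.List.mem_pyRange_one] at hb
    omega
  case hnone =>
    -- passes a > a₀ never write the key
    intro a hamem b hb hbn hne hk
    rw [PySem.List.mem_pyRange_one] at hamem
    rcases lt_trichotomy b a with hba | hba | hba
    · have := pv_formulaA_inj hb hba (by omega) hb0 hlt ha hk
      omega
    · exact hne hba.symm
    · rw [pv_formulaA_swap a b n hne] at hk
      have := pv_formulaA_inj (by omega) hba hbn hb0 hlt ha hk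
      omega
  -- last relevant pass is a = a₀, the final element of pyRange 0 (a₀+1) 1
  have hsplit2 : PySem.List.pyRange 0 a₀ 1 ++ [a₀] ++ PySem.List.pyRange (a₀ + 1) n 1
      = PySem.List.pyRange 0 n 1 := by
    rw [← PySem.List.pyRange_one_succ_right (by omega : (0:Int) ≤ a₀)]
    exact hsplit.symm
  rw [PySem.List.pyRange_one_succ_right (by omega : (0:Int) ≤ a₀), List.foldl_append]
  simp only [List.foldl_cons, List.foldl_nil]
  -- inner pass at a₀: split the b-range at b₀
  rw [hsplit2,
    PySem.List.pyRange_one_append 0 b₀ n (by omega) (by omega),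
    PySem.List.pyRange_one_cons (by omega : b₀ < n), List.foldl_append]
  apply pv_inner_hit
  · omega
  · rfl
  · intro b hb hne hk
    rw [PySem.List.mem_pyRange_one] at hb
    have := pv_only_b0 hb0 hlt ha (by omega) hb.2 hne hk
    omega

theorem pv_pairsB_mem (n : Int) : ∀ p ∈ pairsB n, 0 ≤ p.2 ∧ p.2 < p.1 ∧ p.1 < n := by
  intro p hp
  simp only [pairsB, List.mem_flatMap, List.mem_map] at hp
  obtain ⟨b, hb, a, ha, rfl⟩ := hp
  rw [PySem.List.mem_pyRange_one] at hb ha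
  simp only
  omega

set_option maxRecDepth 100000 in
theorem pv_map19 : (pairsB 19).map (fun p => formulaA p.1 p.2 19) = PySem.List.pyRange 0 171 1 := by decide
set_option maxRecDepth 100000 in
theorem pv_map22 : (pairsB 22).map (fun p => formulaA p.1 p.2 22) = PySem.List.pyRange 0 231 1 := by decide
set_option maxRecDepth 100000 in
theorem pv_map23 : (pairsB 23).map (fun p => formulaA p.1 p.2 23) = PySem.List.pyRange 0 253 1 := by decide
set_option maxRecDepth 100000 in
theorem pv_len19 : (pairsB 19).length = 171 := by decide
set_option maxRecDepth 100000 in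
theorem pv_len22 : (pairsB 22).length = 231 := by decide
set_option maxRecDepth 100000 in
theorem pv_len23 : (pairsB 23).length = 253 := by decide

-- looking up index k in A's dict returns exactly B's k-th pair
theorem pv_key_lookup (n : Int) (N : Nat)
    (hmap : (pairsB n).map (fun p => formulaA p.1 p.2 n) = PySem.List.pyRange 0 (N:Int) 1)
    (k : Nat) (hk : k < (pairsB n).length) :
    (generateTranslate n).get? (k : Int)
      = some [((pairsB n).getD k (0, 0)).1, ((pairsB n).getD k (0, 0)).2] := by
  have hgd : (pairsB n).getD k (0, 0) = (pairsB n)[k] := List.getD_eq_getElem _ _ hk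
  have hpmem : (pairsB n)[k] ∈ pairsB n := List.getElem_mem hk
  have hkN : k < N := by
    have := congrArg List.length hmap
    simp [PySem.List.length_pyRange_one] at this
    omega
  have hkey : formulaA ((pairsB n)[k]).1 ((pairsB n)[k]).2 n = (k : Int) := by
    have h1 : ((pairsB n).map (fun p => formulaA p.1 p.2 n))[k]?
        = some (formulaA ((pairsB n)[k]).1 ((pairsB n)[k]).2 n) := by
      rw [List.getElem?_map, List.getElem?_eq_getElem hk]
      rfl
    rw [hmap] at h1
    have h2 : (PySem.List.pyRange 0 (N:Int) 1)[k]?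
        = some ((PySem.List.pyRange 0 (N:Int) 1)[k]'(by
          simpa [PySem.List.length_pyRange_one] using hkN)) :=
      List.getElem?_eq_getElem _
    rw [h2] at h1
    have h3 := Option.some.inj h1
    rw [PySem.List.getElem_pyRange_one] at h3
    omega
  obtain ⟨h1, h2, h3⟩ := pv_pairsB_mem n _ hpmem
  rw [hgd, ← hkey]
  exact pv_dict_at h1 h2 h3

-- A's enumerate-the-dict loop equals B's zip-the-pair-stream loop
theorem pv_loop_eq (t : PySem.Dict Int (List Int)) (r : List Int) :
    ∀ (linr : List Int) (ps : List (Int × Int)) (i : Int) (acc : List String),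
    linr.length ≤ ps.length →
    (∀ k : Nat, k < linr.length →
      (t.get? (i + (k : Int))).getD [] = [(ps.getD k (0, 0)).1, (ps.getD k (0, 0)).2]) →
    loopA t r linr i acc = loopB r (linr.zip ps) i acc := by
  intro linr
  induction linr with
  | nil => intro ps i acc _ _; rfl
  | cons val rest ih =>
    intro ps i acc hlen h
    match ps with
    | [] => simp at hlen
    | q :: qs =>
      have h0 := h 0 (by simp)
      simp only [List.getD_cons_zero, Int.natCast_zero, add_zero] at h0
      simp only [List.zip_cons_cons, loopA, loopB, h0, List.headD_cons, List.tail_cons]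
      apply ih qs (i + 1) _ (by simpa using hlen)
      intro k hk
      have hk1 := h (k + 1) (by simpa using Nat.succ_lt_succ hk)
      simp only [List.getD_cons_succ] at hk1
      rw [← hk1]
      congr 1
      push_cast
      ring_nf

-- ===== VERDICT (by name: the statement is the Claim_ definition above) =====
theorem check_linearized_spec : Claim_equal_check_linearized := by
  intro r1 linr1 r2 linr2 r3 linr3 _hdom hpre
  obtain ⟨⟨hl1, _⟩, ⟨hl2, _⟩, ⟨hl3, _⟩⟩ := hpre
  unfold Spec_check_linearized
  show loopA (generateTranslate 23) r3 linr3 0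
      (loopA (generateTranslate 22) r2 linr2 0
        (loopA (generateTranslate 19) r1 linr1 0 []))
    = loopB r3 (linr3.zip (pairsB 23)) 0
        (loopB r2 (linr2.zip (pairsB 22)) 0
          (loopB r1 (linr1.zip (pairsB 19)) 0 []))
  have key : ∀ (n : Int) (N : Nat),
      ((pairsB n).map (fun p => formulaA p.1 p.2 n) = PySem.List.pyRange 0 (N:Int) 1) →
      (pairsB n).length = N →
      ∀ (r linr : List Int) (acc : List String), linr.length ≤ N →
      loopA (generateTranslate n) r linr 0 acc = loopB r (linr.zip (pairsB n)) 0 acc := by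
    intro n N hmap hlen r linr acc hlinr
    apply pv_loop_eq
    · omega
    · intro k hk
      have : ((generateTranslate n).get? ((k:Int))) =
          some [((pairsB n).getD k (0, 0)).1, ((pairsB n).getD k (0, 0)).2] :=
        pv_key_lookup n N hmap k (by omega)
      simp [this]
  rw [key 19 171 pv_map19 pv_len19 r1 linr1 _ hl1,
      key 22 231 pv_map22 pv_len22 r2 linr2 _ hl2,
      key 23 253 pv_map23 pv_len23 r3 linr3 _ hl3]
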